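-- pv_equiv track=rewrite | github.com/johnhkchen/sudoku-helper | sudoku_helper/utils.py | get_sector_coords
-- ===== SOURCE A (Python) =====
-- def sector_code(x: int, y: int) -> int:
--     if is_valid_coord(x, y):
--         return (
--             [0, 0, 0, 1, 1, 1, 2, 2, 2],
--             [0, 0, 0, 1, 1, 1, 2, 2, 2],
--             [0, 0, 0, 1, 1, 1, 2, 2, 2],
--             [3, 3, 3, 4, 4, 4, 5, 5, 5],
--             [3, 3, 3, 4, 4, 4, 5, 5, 5],
--             [3, 3, 3, 4, 4, 4, 5, 5, 5],
--             [6, 6, 6, 7, 7, 7, 8, 8, 8],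
--             [6, 6, 6, 7, 7, 7, 8, 8, 8],
--             [6, 6, 6, 7, 7, 7, 8, 8, 8],
--         )[y][x]
--     else:
--         return -1
--
-- def is_valid_coord(x: int, y: int) -> bool:
--     return x in range(9) and y in range(9)
--
-- def get_sector_coords(x_given: int, y_given: int) -> list[tuple[int, int]]:
--     # return a list of 9 (x, y) coordinates for a given sector
--     sector = sector_code(x_given, y_given)
--     coords = []
--     for y in range(9):
--         for x in range(9):
--             if sector_code(x, y) == sector:
--                 coords.append((x, y))
--     return coords
-- ===== SOURCE B (Python) =====
-- def is_valid_coord(x: int, y: int) -> bool: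
--     return x in range(9) and y in range(9)
--
-- def get_sector_coords(x_given: int, y_given: int) -> list[tuple[int, int]]:
--     if not is_valid_coord(x_given, y_given):
--         return []
--     bx = (x_given // 3) * 3
--     by = (y_given // 3) * 3
--     return [(bx + dx, by + dy) for dy in range(3) for dx in range(3)]
-- ===== Notes on version B (the rewrite author's own statement) =====
-- stated objective: faster
-- what changed: B computes the 3x3 block origin arithmetically and enumerates its 9 cells directly, instead of scanning all 81 board cells and comparing sector codes via a lookup table.
import Mathlib
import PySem

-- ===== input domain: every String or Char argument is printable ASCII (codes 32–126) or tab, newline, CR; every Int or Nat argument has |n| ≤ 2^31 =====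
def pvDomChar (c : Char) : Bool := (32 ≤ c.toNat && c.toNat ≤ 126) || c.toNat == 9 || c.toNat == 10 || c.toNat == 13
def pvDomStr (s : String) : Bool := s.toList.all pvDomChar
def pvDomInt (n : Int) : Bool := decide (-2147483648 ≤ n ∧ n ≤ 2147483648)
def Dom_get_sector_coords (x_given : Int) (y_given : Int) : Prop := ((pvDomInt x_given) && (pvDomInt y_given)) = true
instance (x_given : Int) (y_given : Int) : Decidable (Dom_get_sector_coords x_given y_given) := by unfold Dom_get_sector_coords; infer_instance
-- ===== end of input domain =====

-- B replaces A's scan of all 81 cells (comparing table-derived sector codes) with direct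
-- arithmetic enumeration of the 9 cells of the 3x3 block; objective: faster (constant factor).

-- ===== PORT A =====
def is_valid_coord (x : Int) (y : Int) : Bool :=
  decide (0 ≤ x ∧ x < 9) && decide (0 ≤ y ∧ y < 9)

def pySectorTable : List (List Int) :=
  [[0, 0, 0, 1, 1, 1, 2, 2, 2],
   [0, 0, 0, 1, 1, 1, 2, 2, 2],
   [0, 0, 0, 1, 1, 1, 2, 2, 2],
   [3, 3, 3, 4, 4, 4, 5, 5, 5],
   [3, 3, 3, 4, 4, 4, 5, 5, 5],
   [3, 3, 3, 4, 4, 4, 5, 5, 5],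
   [6, 6, 6, 7, 7, 7, 8, 8, 8],
   [6, 6, 6, 7, 7, 7, 8, 8, 8],
   [6, 6, 6, 7, 7, 7, 8, 8, 8]]

def sector_code (x : Int) (y : Int) : Int :=
  if is_valid_coord x y then
    (PySem.List.pyGet? ((PySem.List.pyGet? pySectorTable y).getD []) x).getD 0
  else
    -1

-- the double scan of A, as a function of the precomputed sector value
def pvScanLoop (sector : Int) : List (Int × Int) :=
  (PySem.List.pyRange 0 9 1).foldl (fun coords y =>
    (PySem.List.pyRange 0 9 1).foldl (fun coords x =>
      if sector_code x y == sector then coords ++ [(x, y)] else coords) coords) []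

def get_sector_coords (x_given : Int) (y_given : Int) : List (Int × Int) :=
  let sector := sector_code x_given y_given
  pvScanLoop sector

-- ===== PORT B =====
def get_sector_coords_alt (x_given : Int) (y_given : Int) : List (Int × Int) :=
  if !is_valid_coord x_given y_given then []
  else
    let bx := (PySem.Int.floordiv x_given 3) * 3
    let by_ := (PySem.Int.floordiv y_given 3) * 3
    (PySem.List.pyRange 0 3 1).flatMap (fun dy =>
      (PySem.List.pyRange 0 3 1).map (fun dx => (bx + dx, by_ + dy)))

-- ===== PRECONDITION & SPEC =====
def Spec_get_sector_coords (x_given : Int) (y_given : Int) (out : List (Int × Int)) : Prop := out = get_sector_coords_alt x_given y_given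
instance (x_given : Int) (y_given : Int) (out : List (Int × Int)) : Decidable (Spec_get_sector_coords x_given y_given out) := by unfold Spec_get_sector_coords; infer_instance

-- ===== CLAIM (what is proved, stated in full; the proofs are below) =====
def Claim_equal_get_sector_coords : Prop := ∀ (x_given : Int) (y_given : Int), Dom_get_sector_coords x_given y_given → Spec_get_sector_coords x_given y_given (get_sector_coords x_given y_given)

-- ===== LEMMAS AND PROOFS =====

-- A's scan with sector -1 (invalid input) keeps nothing
lemma pvScanLoop_neg : pvScanLoop (-1) = [] := by decide

lemma key (x y : Int) : get_sector_coords x y = get_sector_coords_alt x y := by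
  by_cases h : is_valid_coord x y = true
  · have h' := h
    rw [is_valid_coord, Bool.and_eq_true, decide_eq_true_iff, decide_eq_true_iff] at h'
    obtain ⟨⟨hx0, hx9⟩, hy0, hy9⟩ := h'
    interval_cases x <;> interval_cases y <;> decide
  · have hs : sector_code x y = -1 := by simp [sector_code, h]
    simp [get_sector_coords, hs, pvScanLoop_neg, get_sector_coords_alt, h]

-- ===== VERDICT (by name: the statement is the Claim_ definition above) =====
theorem get_sector_coords_spec : Claim_equal_get_sector_coords := by
  intro x y _
  unfold Spec_get_sector_coords
  exact key x y
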